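-- pv_equiv track=rewrite | github.com/wavenumber-eng/altium_monkey | src/py/altium_monkey/altium_pcb_special_strings.py | _parse_plus_concat_terms
-- ===== SOURCE A (Python) =====
-- def _parse_plus_concat_terms(text: str) -> list[tuple[str, str]] | None:
--     """
--     Parse a simple PCB concatenation expression into ordered terms.
--
--     Supported terms:
--     - dot token: `.PARAM`
--     - quoted literal: `'text'` or `"text"` (doubled quote escapes supported)
--     - raw segment: unquoted text up to the next `+`
--     """
--     i = 0
--     n = len(text)
--     terms: list[tuple[str, str]] = []
--     expect_term = True
--
--     def _skip_ws(pos: int) -> int: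
--         while pos < n and text[pos].isspace():
--             pos += 1
--         return pos
--
--     while True:
--         i = _skip_ws(i)
--         if i >= n:
--             break
--
--         if expect_term:
--             ch = text[i]
--             if ch in {"'", '"'}:
--                 quote = ch
--                 i += 1
--                 chars: list[str] = []
--                 while i < n:
--                     cur = text[i]
--                     if cur == quote:
--                         if i + 1 < n and text[i + 1] == quote:
--                             chars.append(quote)
--                             i += 2
--                             continue
--                         i += 1
--                         break
--                     chars.append(cur)
--                     i += 1
--                 else:
--                     return None
--                 terms.append(("literal", "".join(chars)))
--             elif ch == ".":
--                 j = i + 1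
--                 if j >= n or not (text[j].isalpha() or text[j] == "_"):
--                     return None
--                 j += 1
--                 while j < n and (text[j].isalnum() or text[j] == "_"):
--                     j += 1
--                 terms.append(("token", text[i + 1 : j]))
--                 i = j
--             else:
--                 j = i
--                 while j < n and text[j] != "+":
--                     j += 1
--                 raw = text[i:j].strip()
--                 if not raw:
--                     return None
--                 terms.append(("raw", raw))
--                 i = j
--             expect_term = False
--             continue
--
--         if text[i] != "+":
--             return None
--         i += 1
--         expect_term = True
--
--     if not terms or expect_term:
--         return None
--     return terms
-- ===== SOURCE B (Python) =====
-- def _parse_plus_concat_terms(text: str) -> list[tuple[str, str]] | None: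
--     """Two-stage: context-free tokenizer into a flat token list (terms and '+'
--     separator markers), then a separate arithmetic alternation check (terms at
--     even indices, '+' at odd indices, odd total length) and extraction."""
--     n = len(text)
--     tokens = []  # term tuples interleaved with the separator marker '+'
--     i = 0
--     while True:
--         while i < n and text[i].isspace():
--             i += 1
--         if i >= n:
--             break
--         ch = text[i]
--         if ch == '+':
--             tokens.append('+')
--             i += 1
--         elif ch in ("'", '"'):
--             i += 1
--             chars = []
--             closed = False
--             while i < n:
--                 if text[i] == ch:
--                     if i + 1 < n and text[i + 1] == ch:
--                         chars.append(ch)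
--                         i += 2
--                         continue
--                     i += 1
--                     closed = True
--                     break
--                 chars.append(text[i])
--                 i += 1
--             if not closed:
--                 return None
--             tokens.append(("literal", "".join(chars)))
--         elif ch == '.':
--             j = i + 1
--             if j >= n or not (text[j].isalpha() or text[j] == '_'):
--                 return None
--             j += 1
--             while j < n and (text[j].isalnum() or text[j] == '_'):
--                 j += 1
--             tokens.append(("token", text[i + 1:j]))
--             i = j
--         else:
--             j = text.find('+', i)
--             if j == -1:
--                 j = n
--             tokens.append(("raw", text[i:j].strip()))
--             i = j
--     if len(tokens) % 2 == 0:
--         return None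
--     for k, t in enumerate(tokens):
--         if (t == '+') != (k % 2 == 1):
--             return None
--     return [t for t in tokens if t != '+']
-- ===== Notes on version B (the rewrite author's own statement) =====
-- stated objective: alternative
-- what changed: Replaces A's single-pass stateful parser (expect_term flag deciding term vs separator while scanning) by a two-stage pipeline: a context-free tokenizer that emits a flat list of term tokens and separator markers with no grammar state, followed by a separate arithmetic validation (odd length, separators exactly at odd indices) and extraction of the terms.
import Mathlib
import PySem

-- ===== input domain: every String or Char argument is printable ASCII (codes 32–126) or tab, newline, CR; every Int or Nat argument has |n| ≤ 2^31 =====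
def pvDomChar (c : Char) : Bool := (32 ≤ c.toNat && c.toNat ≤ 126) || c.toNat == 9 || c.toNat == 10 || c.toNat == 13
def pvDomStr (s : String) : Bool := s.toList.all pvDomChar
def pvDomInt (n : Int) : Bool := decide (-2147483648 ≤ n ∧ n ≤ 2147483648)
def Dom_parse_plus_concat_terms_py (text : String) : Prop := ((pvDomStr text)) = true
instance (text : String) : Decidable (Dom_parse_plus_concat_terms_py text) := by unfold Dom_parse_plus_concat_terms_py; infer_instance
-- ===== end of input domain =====

-- B replaces A's one-pass stateful parser by a two-stage pipeline: a context-free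
-- tokenizer producing a flat token list, then an arithmetic index-parity alternation
-- check and extraction; objective: alternative decomposition of the same O(n) task.

-- Character-scanning helpers shared by both ports (the same inner while-loops appear
-- verbatim in both Python versions). Each carries a fuel argument that only makes the
-- recursion structural; every call site passes enough fuel (positions grow by ≥ 1 per
-- step and stay ≤ cs.length, so cs.length + 1 steps always reach the exit condition).

-- while pos < n and text[pos].isspace(): pos += 1
def pvSkipWs (cs : List Char) (fuel p : Nat) : Nat :=
  match fuel with
  | 0 => p
  | f + 1 =>
      if p < cs.length ∧ PySem.Chars.isspace (cs.getD p ' ') then pvSkipWs cs f (p + 1) else p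

-- the quote-scanning while loop: (collected chars, position after the closing quote)
def pvScanQuote (cs : List Char) (q : Char) (fuel p : Nat) (acc : List Char) :
    Option (List Char × Nat) :=
  match fuel with
  | 0 => none
  | f + 1 =>
      if p < cs.length then
        if cs.getD p ' ' = q then
          if p + 1 < cs.length ∧ cs.getD (p + 1) ' ' = q then
            pvScanQuote cs q f (p + 2) (acc ++ [q])
          else some (acc, p + 1)
        else pvScanQuote cs q f (p + 1) (acc ++ [cs.getD p ' '])
      else none

-- while j < n and (text[j].isalnum() or text[j] == "_"): j += 1
def pvScanIdent (cs : List Char) (fuel j : Nat) : Nat :=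
  match fuel with
  | 0 => j
  | f + 1 =>
      if j < cs.length ∧ (PySem.Chars.isalnum (cs.getD j ' ') ∨ cs.getD j ' ' = '_') then
        pvScanIdent cs f (j + 1)
      else j

-- while j < n and text[j] != "+": j += 1   (= text.find('+', j) with -1 ↦ n)
def pvFindPlus (cs : List Char) (fuel j : Nat) : Nat :=
  match fuel with
  | 0 => j
  | f + 1 => if j < cs.length ∧ cs.getD j ' ' ≠ '+' then pvFindPlus cs f (j + 1) else j

-- ===== PORT A =====
-- A's single loop over state (i, terms, expect_term); the final
-- 'if not terms or expect_term: return None' is folded into the i >= n exit.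
def pvLoopA (cs : List Char) (fuel : Nat) (i : Nat) (terms : List (String × String))
    (expect : Bool) : Option (List (String × String)) :=
  match fuel with
  | 0 => none
  | f + 1 =>
      let ii := pvSkipWs cs (cs.length + 1) i
      if cs.length ≤ ii then
        if terms.isEmpty || expect then none else some terms
      else if expect then
        let ch := cs.getD ii ' '
        if ch = '\'' ∨ ch = '"' then
          match pvScanQuote cs ch (cs.length + 1) (ii + 1) [] with
          | none => none
          | some (chars, i') =>
              pvLoopA cs f i' (terms ++ [("literal", String.ofList chars)]) false
        else if ch = '.' then
          if ii + 1 < cs.length ∧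
              (PySem.Chars.isalpha (cs.getD (ii + 1) ' ') ∨ cs.getD (ii + 1) ' ' = '_') then
            let j := pvScanIdent cs (cs.length + 1) (ii + 2)
            pvLoopA cs f j
              (terms ++ [("token", String.ofList ((cs.drop (ii + 1)).take (j - (ii + 1))))]) false
          else none
        else
          let j := pvFindPlus cs (cs.length + 1) ii
          let raw := PySem.Chars.strip ((cs.drop ii).take (j - ii))
          if raw.isEmpty then none
          else pvLoopA cs f j (terms ++ [("raw", String.ofList raw)]) false
      else if cs.getD ii ' ' ≠ '+' then none
      else pvLoopA cs f (ii + 1) terms true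

def parse_plus_concat_terms_py (text : String) : Option (List (String × String)) :=
  pvLoopA text.toList (2 * text.toList.length + 5) 0 [] true

-- ===== PORT B =====
-- Stage 1: the context-free tokenizer ('+' separators are the token 'none',
-- terms are 'some (kind, payload)'); returns none on a lexing failure
-- (unterminated quote, malformed dot token).
def pvLexB (cs : List Char) (fuel i : Nat) (acc : List (Option (String × String))) :
    Option (List (Option (String × String))) :=
  match fuel with
  | 0 => none
  | f + 1 =>
      let ii := pvSkipWs cs (cs.length + 1) i
      if cs.length ≤ ii then some acc
      else if cs.getD ii ' ' = '+' then pvLexB cs f (ii + 1) (acc ++ [none])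
      else if cs.getD ii ' ' = '\'' ∨ cs.getD ii ' ' = '"' then
        match pvScanQuote cs (cs.getD ii ' ') (cs.length + 1) (ii + 1) [] with
        | none => none
        | some (chars, i') => pvLexB cs f i' (acc ++ [some ("literal", String.ofList chars)])
      else if cs.getD ii ' ' = '.' then
        if ii + 1 < cs.length ∧
            (PySem.Chars.isalpha (cs.getD (ii + 1) ' ') ∨ cs.getD (ii + 1) ' ' = '_') then
          pvLexB cs f (pvScanIdent cs (cs.length + 1) (ii + 2))
            (acc ++ [some ("token",
              String.ofList ((cs.drop (ii + 1)).take
                (pvScanIdent cs (cs.length + 1) (ii + 2) - (ii + 1))))])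
        else none
      else
        pvLexB cs f (pvFindPlus cs (cs.length + 1) ii)
          (acc ++ [some ("raw",
            String.ofList (PySem.Chars.strip
              ((cs.drop ii).take (pvFindPlus cs (cs.length + 1) ii - ii))))])

-- Stage 2: 'for k, t in enumerate(tokens): if (t == '+') != (k % 2 == 1): return None'
def pvAltCheckB (toks : List (Option (String × String))) (k : Nat) : Bool :=
  match toks with
  | [] => true
  | t :: rest => (t.isNone == decide (k % 2 = 1)) && pvAltCheckB rest (k + 1)

def parse_plus_concat_terms_py_alt (text : String) : Option (List (String × String)) :=
  match pvLexB text.toList (text.toList.length + 2) 0 [] with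
  | none => none
  | some tokens =>
      if tokens.length % 2 = 0 then none
      else if pvAltCheckB tokens 0 then some (tokens.filterMap id) else none

-- ===== PRECONDITION & SPEC =====
def Spec_parse_plus_concat_terms_py (text : String) (out : Option (List (String × String))) : Prop := out = parse_plus_concat_terms_py_alt text
instance (text : String) (out : Option (List (String × String))) : Decidable (Spec_parse_plus_concat_terms_py text out) := by unfold Spec_parse_plus_concat_terms_py; infer_instance

-- ===== CLAIM (what is proved, stated in full; the proofs are below) =====
def Claim_equal_parse_plus_concat_terms_py : Prop := ∀ (text : String), Dom_parse_plus_concat_terms_py text → Spec_parse_plus_concat_terms_py text (parse_plus_concat_terms_py text)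

-- ===== LEMMAS AND PROOFS =====

theorem pvSkipWs_ge (cs : List Char) (fuel : Nat) : ∀ p, p ≤ pvSkipWs cs fuel p := by
  induction fuel with
  | zero => intro p; simp [pvSkipWs]
  | succ f ih =>
      intro p
      rw [pvSkipWs]
      split
      · exact le_trans (by omega) (ih (p + 1))
      · exact le_rfl

-- with enough fuel, the whitespace skip really stops at a non-space character
theorem pvSkipWs_stop (cs : List Char) (fuel : Nat) :
    ∀ p, cs.length - p < fuel → pvSkipWs cs fuel p < cs.length →
      PySem.Chars.isspace (cs.getD (pvSkipWs cs fuel p) ' ') = false := by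
  induction fuel with
  | zero => intro p h; omega
  | succ f ih =>
      intro p hf hlt
      by_cases h : p < cs.length ∧ PySem.Chars.isspace (cs.getD p ' ')
      · rw [pvSkipWs, if_pos h] at hlt ⊢
        exact ih (p + 1) (by omega) hlt
      · rw [pvSkipWs, if_neg h] at hlt ⊢
        simp only [not_and_or] at h
        rcases h with h | h
        · omega
        · simpa using h

theorem pvScanQuote_gt (cs : List Char) (q : Char) (fuel : Nat) :
    ∀ p acc l p', pvScanQuote cs q fuel p acc = some (l, p') → p < p' := by
  induction fuel with
  | zero => intro p acc l p' h; exact absurd h (by simp [pvScanQuote])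
  | succ f ih =>
      intro p acc l p' h
      rw [pvScanQuote] at h
      split_ifs at h with h1 h2 h3
      · have := ih (p + 2) (acc ++ [q]) l p' h
        omega
      · cases h
        omega
      · have := ih (p + 1) (acc ++ [cs.getD p ' ']) l p' h
        omega

theorem pvScanIdent_ge (cs : List Char) (fuel : Nat) : ∀ j, j ≤ pvScanIdent cs fuel j := by
  induction fuel with
  | zero => intro j; simp [pvScanIdent]
  | succ f ih =>
      intro j
      rw [pvScanIdent]
      split
      · exact le_trans (by omega) (ih (j + 1))
      · exact le_rfl

theorem pvFindPlus_ge (cs : List Char) (fuel : Nat) : ∀ j, j ≤ pvFindPlus cs fuel j := by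
  induction fuel with
  | zero => intro j; simp [pvFindPlus]
  | succ f ih =>
      intro j
      rw [pvFindPlus]
      split
      · exact le_trans (by omega) (ih (j + 1))
      · exact le_rfl

theorem pvFindPlus_gt (cs : List Char) (j : Nat) (hj : j < cs.length)
    (hne : cs.getD j ' ' ≠ '+') : j + 1 ≤ pvFindPlus cs (cs.length + 1) j := by
  rw [pvFindPlus]
  rw [if_pos ⟨hj, hne⟩]
  exact pvFindPlus_ge cs cs.length (j + 1)

-- the tokenizer's accumulator only prepends
theorem pvLexB_acc (cs : List Char) (fuel : Nat) :
    ∀ i acc, pvLexB cs fuel i acc = Option.map (acc ++ ·) (pvLexB cs fuel i []) := by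
  induction fuel with
  | zero => intro i acc; simp [pvLexB]
  | succ f ih =>
      intro i acc
      rw [pvLexB]
      conv_rhs => rw [pvLexB]
      by_cases hend : cs.length ≤ pvSkipWs cs (cs.length + 1) i
      · simp [hend]
      · simp only [if_neg hend]
        by_cases hp : cs.getD (pvSkipWs cs (cs.length + 1) i) ' ' = '+'
        · simp only [if_pos hp]
          rw [ih _ (acc ++ [none]), ih _ ([] ++ [none])]
          cases pvLexB cs f (pvSkipWs cs (cs.length + 1) i + 1) [] <;> simp
        · simp only [if_neg hp]
          by_cases hq : cs.getD (pvSkipWs cs (cs.length + 1) i) ' ' = '\'' ∨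
              cs.getD (pvSkipWs cs (cs.length + 1) i) ' ' = '"'
          · simp only [if_pos hq]
            cases hsq : pvScanQuote cs (cs.getD (pvSkipWs cs (cs.length + 1) i) ' ')
                (cs.length + 1) (pvSkipWs cs (cs.length + 1) i + 1) [] with
            | none => simp
            | some r =>
                obtain ⟨chars, i'⟩ := r
                simp only
                rw [ih i' (acc ++ [some ("literal", String.ofList chars)]),
                  ih i' ([] ++ [some ("literal", String.ofList chars)])]
                cases pvLexB cs f i' [] <;> simp
          · simp only [if_neg hq]
            by_cases hd : cs.getD (pvSkipWs cs (cs.length + 1) i) ' ' = '.'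
            · simp only [if_pos hd]
              split_ifs with hid
              · rw [ih _ (acc ++ _), ih _ ([] ++ _)]
                cases pvLexB cs f (pvScanIdent cs (cs.length + 1)
                  (pvSkipWs cs (cs.length + 1) i + 2)) [] <;> simp
              · rfl
            · simp only [if_neg hd]
              rw [ih _ (acc ++ _), ih _ ([] ++ _)]
              cases pvLexB cs f (pvFindPlus cs (cs.length + 1)
                (pvSkipWs cs (cs.length + 1) i)) [] <;> simp

theorem pvAltCheckB_parity (toks : List (Option (String × String))) :
    ∀ k, pvAltCheckB toks (k + 2) = pvAltCheckB toks k := by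
  induction toks with
  | nil => intro k; rfl
  | cons t rest ih =>
      intro k
      simp only [pvAltCheckB]
      rw [Nat.add_mod_right, ih (k + 1)]

-- the suffix-validity predicate: what A's remaining input must lex to,
-- depending on whether A is expecting a term or a separator
def pvVS (expect : Bool) (toks : List (Option (String × String))) : Bool :=
  decide (toks.length % 2 = if expect then 1 else 0) &&
    pvAltCheckB toks (if expect then 0 else 1)

theorem pvVS_true_nil : pvVS true [] = false := by decide

theorem pvVS_false_nil : pvVS false [] = true := by decide

theorem pvVS_true_plus (r : List (Option (String × String))) : pvVS true (none :: r) = false := by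
  simp [pvVS, pvAltCheckB]

theorem pvVS_false_term (t : String × String) (r : List (Option (String × String))) :
    pvVS false (some t :: r) = false := by
  simp [pvVS, pvAltCheckB]

theorem pvVS_true_term (t : String × String) (r : List (Option (String × String))) :
    pvVS true (some t :: r) = pvVS false r := by
  have h : ((r.length + 1) % 2 = 1) ↔ (r.length % 2 = 0) := by omega
  simp [pvVS, pvAltCheckB, h]

theorem pvVS_false_plus (r : List (Option (String × String))) :
    pvVS false (none :: r) = pvVS true r := by
  have h : ((r.length + 1) % 2 = 0) ↔ (r.length % 2 = 1) := by omega
  have h2 : pvAltCheckB r 2 = pvAltCheckB r 0 := by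
    have := pvAltCheckB_parity r 0
    simpa using this
  simp [pvVS, pvAltCheckB, h, h2]

-- a list containing a non-space character strips to a nonempty list
theorem pvStrip_ne_nil (l : List Char) (c : Char) (hc : c ∈ l)
    (hs : PySem.Chars.isspace c = false) : PySem.Chars.strip l ≠ [] := by
  have hmem : ∀ (m : List Char), c ∈ m → c ∈ m.dropWhile PySem.Chars.isspace := by
    intro m hm
    have := List.takeWhile_append_dropWhile (p := PySem.Chars.isspace) (l := m)
    rw [← this] at hm
    rcases List.mem_append.mp hm with h | h
    · exact absurd (List.mem_takeWhile_imp h) (by simp [hs])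
    · exact h
  have h1 : c ∈ l.dropWhile PySem.Chars.isspace := hmem l hc
  have h2 : c ∈ ((l.dropWhile PySem.Chars.isspace).reverse.dropWhile PySem.Chars.isspace) :=
    hmem _ (List.mem_reverse.mpr h1)
  have : PySem.Chars.strip l =
      ((l.dropWhile PySem.Chars.isspace).reverse.dropWhile PySem.Chars.isspace).reverse := rfl
  rw [this]
  intro h
  rw [List.reverse_eq_nil_iff] at h
  rw [h] at h2
  exact absurd h2 (List.not_mem_nil)

-- MAIN LEMMA: A's loop from any state equals "lex the rest, validate the suffix".
theorem pvMain (cs : List Char) : ∀ (k fA fB i : Nat) (terms : List (String × String))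
    (expect : Bool), cs.length + 1 - i ≤ k → k + 1 ≤ fA → k + 1 ≤ fB →
    (expect = false → terms ≠ []) →
    pvLoopA cs fA i terms expect =
      (match pvLexB cs fB i [] with
       | none => none
       | some toks => if pvVS expect toks then some (terms ++ toks.filterMap id) else none) := by
  intro k
  induction k with
  | zero =>
      intro fA fB i terms expect hk hfA hfB hne
      obtain ⟨a, rfl⟩ : ∃ a, fA = a + 1 := ⟨fA - 1, by omega⟩
      obtain ⟨b, rfl⟩ : ∃ b, fB = b + 1 := ⟨fB - 1, by omega⟩
      have hle : cs.length ≤ pvSkipWs cs (cs.length + 1) i :=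
        le_trans (by omega) (pvSkipWs_ge cs (cs.length + 1) i)
      rw [pvLoopA, pvLexB, if_pos hle, if_pos hle]
      cases expect with
      | true => simp [pvVS_true_nil]
      | false => simp [pvVS_false_nil, List.isEmpty_iff, hne rfl]
  | succ k ih =>
      intro fA fB i terms expect hk hfA hfB hne
      obtain ⟨a, rfl⟩ : ∃ a, fA = a + 1 := ⟨fA - 1, by omega⟩
      obtain ⟨b, rfl⟩ : ∃ b, fB = b + 1 := ⟨fB - 1, by omega⟩
      rw [pvLoopA, pvLexB]
      simp only [List.nil_append]
      by_cases hend : cs.length ≤ pvSkipWs cs (cs.length + 1) i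
      · rw [if_pos hend, if_pos hend]
        cases expect with
        | true => simp [pvVS_true_nil]
        | false => simp [pvVS_false_nil, List.isEmpty_iff, hne rfl]
      · rw [if_neg hend, if_neg hend]
        have hsk := pvSkipWs_ge cs (cs.length + 1) i
        cases expect with
        | false =>
            rw [if_neg (by decide : ¬ ((false : Bool) = true))]
            by_cases hp : cs.getD (pvSkipWs cs (cs.length + 1) i) ' ' = '+'
            · rw [if_neg (not_not_intro hp), if_pos hp,
                pvLexB_acc cs b (pvSkipWs cs (cs.length + 1) i + 1) [none]]
              rw [ih a b (pvSkipWs cs (cs.length + 1) i + 1) terms true (by omega)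
                (by omega) (by omega) (by simp)]
              cases pvLexB cs b (pvSkipWs cs (cs.length + 1) i + 1) [] with
              | none => rfl
              | some rest => simp [pvVS_false_plus]
            · rw [if_pos hp, if_neg hp]
              by_cases hq : cs.getD (pvSkipWs cs (cs.length + 1) i) ' ' = '\'' ∨
                  cs.getD (pvSkipWs cs (cs.length + 1) i) ' ' = '"'
              · rw [if_pos hq]
                cases hsq : pvScanQuote cs (cs.getD (pvSkipWs cs (cs.length + 1) i) ' ')
                    (cs.length + 1) (pvSkipWs cs (cs.length + 1) i + 1) [] with
                | none => rfl
                | some r =>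
                    obtain ⟨chars, i'⟩ := r
                    simp only
                    rw [pvLexB_acc cs b i']
                    cases pvLexB cs b i' [] with
                    | none => rfl
                    | some rest => simp [pvVS_false_term]
              · rw [if_neg hq]
                by_cases hd : cs.getD (pvSkipWs cs (cs.length + 1) i) ' ' = '.'
                · rw [if_pos hd]
                  by_cases hid : pvSkipWs cs (cs.length + 1) i + 1 < cs.length ∧
                      (PySem.Chars.isalpha (cs.getD (pvSkipWs cs (cs.length + 1) i + 1) ' ') ∨
                        cs.getD (pvSkipWs cs (cs.length + 1) i + 1) ' ' = '_')
                  · rw [if_pos hid, pvLexB_acc cs b]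
                    cases pvLexB cs b (pvScanIdent cs (cs.length + 1)
                        (pvSkipWs cs (cs.length + 1) i + 2)) [] with
                    | none => rfl
                    | some rest => simp [pvVS_false_term]
                  · rw [if_neg hid]
                · rw [if_neg hd, pvLexB_acc cs b]
                  cases pvLexB cs b (pvFindPlus cs (cs.length + 1)
                      (pvSkipWs cs (cs.length + 1) i)) [] with
                  | none => rfl
                  | some rest => simp [pvVS_false_term]
        | true =>
            rw [if_pos rfl]
            by_cases hp : cs.getD (pvSkipWs cs (cs.length + 1) i) ' ' = '+'
            · -- A: raw scan stops immediately, empty raw, None; B: leading '+' fails validation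
              have hq : ¬ (cs.getD (pvSkipWs cs (cs.length + 1) i) ' ' = '\'' ∨
                  cs.getD (pvSkipWs cs (cs.length + 1) i) ' ' = '"') := by
                rw [hp]; decide
              have hd : cs.getD (pvSkipWs cs (cs.length + 1) i) ' ' ≠ '.' := by
                rw [hp]; decide
              rw [if_neg hq, if_neg hd, if_pos hp]
              have hfp : pvFindPlus cs (cs.length + 1) (pvSkipWs cs (cs.length + 1) i) =
                  pvSkipWs cs (cs.length + 1) i := by
                rw [pvFindPlus, if_neg]
                rintro ⟨-, hcontra⟩
                exact hcontra hp
              rw [hfp]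
              simp only [Nat.sub_self, List.take_zero]
              rw [if_pos (by decide : (PySem.Chars.strip ([] : List Char)).isEmpty = true)]
              rw [pvLexB_acc cs b (pvSkipWs cs (cs.length + 1) i + 1) [none]]
              cases pvLexB cs b (pvSkipWs cs (cs.length + 1) i + 1) [] with
              | none => rfl
              | some rest => simp [pvVS_true_plus]
            · rw [if_neg hp]
              by_cases hq : cs.getD (pvSkipWs cs (cs.length + 1) i) ' ' = '\'' ∨
                  cs.getD (pvSkipWs cs (cs.length + 1) i) ' ' = '"'
              · rw [if_pos hq, if_pos hq]
                cases hsq : pvScanQuote cs (cs.getD (pvSkipWs cs (cs.length + 1) i) ' ')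
                    (cs.length + 1) (pvSkipWs cs (cs.length + 1) i + 1) [] with
                | none => rfl
                | some r =>
                    obtain ⟨chars, i'⟩ := r
                    simp only
                    have hgt := pvScanQuote_gt cs _ (cs.length + 1) _ [] chars i' hsq
                    rw [pvLexB_acc cs b i',
                      ih a b i' (terms ++ [("literal", String.ofList chars)]) false
                        (by omega) (by omega) (by omega) (by simp)]
                    cases pvLexB cs b i' [] with
                    | none => rfl
                    | some rest => simp [pvVS_true_term]
              · rw [if_neg hq, if_neg hq]
                by_cases hd : cs.getD (pvSkipWs cs (cs.length + 1) i) ' ' = '.'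
                · rw [if_pos hd, if_pos hd]
                  by_cases hid : pvSkipWs cs (cs.length + 1) i + 1 < cs.length ∧
                      (PySem.Chars.isalpha (cs.getD (pvSkipWs cs (cs.length + 1) i + 1) ' ') ∨
                        cs.getD (pvSkipWs cs (cs.length + 1) i + 1) ' ' = '_')
                  · rw [if_pos hid, if_pos hid]
                    have hge := pvScanIdent_ge cs (cs.length + 1)
                      (pvSkipWs cs (cs.length + 1) i + 2)
                    rw [pvLexB_acc cs b, ih a b
                      (pvScanIdent cs (cs.length + 1) (pvSkipWs cs (cs.length + 1) i + 2))
                      (terms ++ [("token", String.ofList ((cs.drop (pvSkipWs cs (cs.length + 1) i + 1)).take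
                        (pvScanIdent cs (cs.length + 1) (pvSkipWs cs (cs.length + 1) i + 2) -
                          (pvSkipWs cs (cs.length + 1) i + 1))))]) false
                      (by omega) (by omega) (by omega) (by simp)]
                    cases pvLexB cs b (pvScanIdent cs (cs.length + 1)
                        (pvSkipWs cs (cs.length + 1) i + 2)) [] with
                    | none => rfl
                    | some rest => simp [pvVS_true_term]
                  · rw [if_neg hid, if_neg hid]
                · rw [if_neg hd, if_neg hd]
                  -- raw segment: nonempty after strip, since its first char is non-space
                  have hgt := pvFindPlus_gt cs (pvSkipWs cs (cs.length + 1) i)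
                    (by omega) hp
                  have hstop := pvSkipWs_stop cs (cs.length + 1) i (by omega) (by omega)
                  have hmem : cs.getD (pvSkipWs cs (cs.length + 1) i) ' ' ∈
                      (cs.drop (pvSkipWs cs (cs.length + 1) i)).take
                        (pvFindPlus cs (cs.length + 1) (pvSkipWs cs (cs.length + 1) i) -
                          pvSkipWs cs (cs.length + 1) i) := by
                    have hdrop : cs.drop (pvSkipWs cs (cs.length + 1) i) =
                        cs.getD (pvSkipWs cs (cs.length + 1) i) ' ' ::
                          cs.drop (pvSkipWs cs (cs.length + 1) i + 1) := by
                      rw [List.getD_eq_getElem cs ' ' (by omega)]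
                      exact (List.getElem_cons_drop (by omega)).symm
                    rw [hdrop]
                    obtain ⟨m, hm⟩ : ∃ m, pvFindPlus cs (cs.length + 1)
                        (pvSkipWs cs (cs.length + 1) i) - pvSkipWs cs (cs.length + 1) i =
                        m + 1 := ⟨pvFindPlus cs (cs.length + 1) (pvSkipWs cs (cs.length + 1) i) -
                          pvSkipWs cs (cs.length + 1) i - 1, by omega⟩
                    rw [hm, List.take_succ_cons]
                    exact List.mem_cons_self
                  have hne' := pvStrip_ne_nil _ _ hmem hstop
                  rw [if_neg (by simpa [List.isEmpty_iff] using hne')]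
                  rw [pvLexB_acc cs b, ih a b
                    (pvFindPlus cs (cs.length + 1) (pvSkipWs cs (cs.length + 1) i))
                    (terms ++ [("raw", String.ofList (PySem.Chars.strip
                      ((cs.drop (pvSkipWs cs (cs.length + 1) i)).take
                        (pvFindPlus cs (cs.length + 1) (pvSkipWs cs (cs.length + 1) i) -
                          pvSkipWs cs (cs.length + 1) i))))]) false
                    (by omega) (by omega) (by omega) (by simp)]
                  cases pvLexB cs b (pvFindPlus cs (cs.length + 1)
                      (pvSkipWs cs (cs.length + 1) i)) [] with
                  | none => rfl
                  | some rest => simp [pvVS_true_term]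

-- ===== VERDICT (by name: the statement is the Claim_ definition above) =====
theorem parse_plus_concat_terms_py_spec : Claim_equal_parse_plus_concat_terms_py := by
  intro text _hdom
  unfold Spec_parse_plus_concat_terms_py parse_plus_concat_terms_py parse_plus_concat_terms_py_alt
  rw [pvMain text.toList (text.toList.length + 1) (2 * text.toList.length + 5)
    (text.toList.length + 2) 0 [] true (by omega) (by omega) (by omega) (by simp)]
  cases pvLexB text.toList (text.toList.length + 2) 0 [] with
  | none => rfl
  | some toks =>
      simp only [pvVS, List.nil_append]
      by_cases hlen : toks.length % 2 = 0
      · rw [if_pos hlen]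
        have : ¬ (toks.length % 2 = 1) := by omega
        simp [this]
      · rw [if_neg hlen]
        have : toks.length % 2 = 1 := by omega
        simp only [this]
        cases hchk : pvAltCheckB toks 0 <;> simp [hchk]
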